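-- pv_equiv track=rewrite | github.com/abhipsa14/trendweave_ | model_trainer.py | _extract_fashion_entities_from_data
-- ===== SOURCE A (Python) =====
-- from typing import List, Dict
--
-- def _extract_fashion_entities_from_data(training_data: List[Dict]):
--     """Extract fashion entities from training data"""
--     fashion_entities = {
--         'brands': set(),
--         'materials': set(),
--         'styles': set(),
--         'colors': set(),
--         'garments': set(),
--         'accessories': set(),
--         'patterns': set()
--     }
--
--     fashion_keywords = {
--         'brands': ['gucci', 'prada', 'chanel', 'dior', 'versace', 'nike', 'adidas', 'zara'],
--         'materials': ['silk', 'cotton', 'wool', 'linen', 'leather', 'denim', 'velvet'],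
--         'styles': ['minimalist', 'vintage', 'bohemian', 'streetwear', 'classic', 'modern'],
--         'colors': ['black', 'white', 'red', 'blue', 'green', 'pink', 'navy'],
--         'garments': ['dress', 'shirt', 'pants', 'jacket', 'skirt', 'sweater'],
--         'accessories': ['bag', 'shoes', 'jewelry', 'watch', 'sunglasses', 'hat'],
--         'patterns': ['floral', 'striped', 'printed', 'solid', 'checkered']
--     }
--
--     for item in training_data:
--         text = item.get('text', '').lower()
--         for category, keywords in fashion_keywords.items():
--             for keyword in keywords:
--                 if keyword in text:
--                     fashion_entities[category].add(keyword)
--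
--     # Convert to lists
--     return {k: sorted(list(v)) for k, v in fashion_entities.items()}
-- ===== SOURCE B (Python) =====
-- from typing import List, Dict
--
-- def _extract_fashion_entities_from_data(training_data: List[Dict]):
--     """Extract fashion entities by scanning a single joined corpus"""
--     fashion_keywords = {
--         'brands': ['gucci', 'prada', 'chanel', 'dior', 'versace', 'nike', 'adidas', 'zara'],
--         'materials': ['silk', 'cotton', 'wool', 'linen', 'leather', 'denim', 'velvet'],
--         'styles': ['minimalist', 'vintage', 'bohemian', 'streetwear', 'classic', 'modern'],
--         'colors': ['black', 'white', 'red', 'blue', 'green', 'pink', 'navy'],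
--         'garments': ['dress', 'shirt', 'pants', 'jacket', 'skirt', 'sweater'],
--         'accessories': ['bag', 'shoes', 'jewelry', 'watch', 'sunglasses', 'hat'],
--         'patterns': ['floral', 'striped', 'printed', 'solid', 'checkered']
--     }
--     # no keyword contains a space, so joining with ' ' cannot create a match
--     # across a text boundary
--     corpus = ' '.join(item.get('text', '').lower() for item in training_data)
--     return {category: sorted(kw for kw in keywords if kw in corpus)
--             for category, keywords in fashion_keywords.items()}
-- ===== Notes on version B (the rewrite author's own statement) =====
-- stated objective: alternative
-- what changed: Replaces the item-major triple loop that mutates a dict of sets (then sorts each set) by joining all lowered texts into one space-separated corpus and testing each fixed keyword once against that corpus (correct because no keyword contains a space, so no match can straddle a text boundary); it trades per-item scans for one join plus one scan per keyword, at similar measured cost.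
import Mathlib
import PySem

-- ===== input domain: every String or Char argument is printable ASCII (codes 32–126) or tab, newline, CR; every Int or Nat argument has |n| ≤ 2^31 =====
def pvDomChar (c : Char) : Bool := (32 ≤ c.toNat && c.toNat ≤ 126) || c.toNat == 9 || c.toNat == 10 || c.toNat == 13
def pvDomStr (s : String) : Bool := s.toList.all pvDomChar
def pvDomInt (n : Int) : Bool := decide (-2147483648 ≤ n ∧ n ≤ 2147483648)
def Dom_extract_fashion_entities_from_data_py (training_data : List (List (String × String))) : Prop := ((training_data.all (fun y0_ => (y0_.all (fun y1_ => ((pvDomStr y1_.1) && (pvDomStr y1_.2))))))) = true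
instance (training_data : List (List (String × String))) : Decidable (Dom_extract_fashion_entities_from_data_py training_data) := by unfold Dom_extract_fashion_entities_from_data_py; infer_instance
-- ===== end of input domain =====

-- B replaces A's item-major triple loop mutating a dict of sets (then sorting each set)
-- by joining all lowered texts into ONE space-separated corpus and testing each fixed keyword
-- once against it (no keyword contains a space, so no match straddles a text boundary).

-- ===== PORT A =====
-- the fixed fashion_keywords table, written verbatim in A
def pvFashionKeywords : List (String × List String) :=
  [("brands", ["gucci", "prada", "chanel", "dior", "versace", "nike", "adidas", "zara"]),
   ("materials", ["silk", "cotton", "wool", "linen", "leather", "denim", "velvet"]),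
   ("styles", ["minimalist", "vintage", "bohemian", "streetwear", "classic", "modern"]),
   ("colors", ["black", "white", "red", "blue", "green", "pink", "navy"]),
   ("garments", ["dress", "shirt", "pants", "jacket", "skirt", "sweater"]),
   ("accessories", ["bag", "shoes", "jewelry", "watch", "sunglasses", "hat"]),
   ("patterns", ["floral", "striped", "printed", "solid", "checkered"])]

-- item.get('text', '').lower()
def pvTextOf (item : List (String × String)) : String :=
  PySem.Str.lower (PySem.Dict.getD (PySem.Dict.mk item) "text" "")

-- A's fashion_entities dict: seven fixed keys, each holding a set
def D7 (s1 s2 s3 s4 s5 s6 s7 : PySem.Set String) : PySem.Dict String (PySem.Set String) :=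
  PySem.Dict.mk [("brands", s1), ("materials", s2), ("styles", s3), ("colors", s4),
                 ("garments", s5), ("accessories", s6), ("patterns", s7)]

-- fashion_entities[category].add(keyword): category is always a key of fashion_entities,
-- so the __getitem__ + in-place set.add is Dict.modify at that key.
def extract_fashion_entities_from_data_py (training_data : List (List (String × String))) : List (String × List String) :=
  let fashion_entities := D7 PySem.Set.empty PySem.Set.empty PySem.Set.empty PySem.Set.empty
                             PySem.Set.empty PySem.Set.empty PySem.Set.empty
  let final := training_data.foldl (fun fe item =>
      pvFashionKeywords.foldl (fun fe ck =>
        ck.2.foldl (fun fe kw =>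
          if PySem.Str.isIn kw (pvTextOf item) then
            PySem.Dict.modify fe ck.1 [] (fun s => PySem.Set.add s kw)
          else fe) fe) fe)
    fashion_entities
  final.items.map (fun kv => (kv.1, PySem.List.sorted kv.2 (fun x => x) false))

-- ===== PORT B =====
-- corpus = ' '.join(item.get('text','').lower() for item in training_data);
-- then each category is sorted([kw for kw in keywords if kw in corpus]).
def extract_fashion_entities_from_data_py_alt (training_data : List (List (String × String))) : List (String × List String) :=
  let corpus := PySem.Str.join " " (training_data.map (fun item =>
      PySem.Str.lower (PySem.Dict.getD (PySem.Dict.mk item) "text" "")))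
  [("brands", ["gucci", "prada", "chanel", "dior", "versace", "nike", "adidas", "zara"]),
   ("materials", ["silk", "cotton", "wool", "linen", "leather", "denim", "velvet"]),
   ("styles", ["minimalist", "vintage", "bohemian", "streetwear", "classic", "modern"]),
   ("colors", ["black", "white", "red", "blue", "green", "pink", "navy"]),
   ("garments", ["dress", "shirt", "pants", "jacket", "skirt", "sweater"]),
   ("accessories", ["bag", "shoes", "jewelry", "watch", "sunglasses", "hat"]),
   ("patterns", ["floral", "striped", "printed", "solid", "checkered"])].map
    (fun ck => (ck.1,
      PySem.List.sorted (ck.2.filter (fun kw => PySem.Str.isIn kw corpus)) (fun x => x) false))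

-- ===== PRECONDITION & SPEC =====
def Spec_extract_fashion_entities_from_data_py (training_data : List (List (String × String))) (out : List (String × List String)) : Prop := out = extract_fashion_entities_from_data_py_alt training_data
instance (training_data : List (List (String × String))) (out : List (String × List String)) : Decidable (Spec_extract_fashion_entities_from_data_py training_data out) := by unfold Spec_extract_fashion_entities_from_data_py; infer_instance

-- ===== CLAIM (what is proved, stated in full; the proofs are below) =====
def Claim_equal_extract_fashion_entities_from_data_py : Prop := ∀ (training_data : List (List (String × String))), Dom_extract_fashion_entities_from_data_py training_data → Spec_extract_fashion_entities_from_data_py training_data (extract_fashion_entities_from_data_py training_data)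

-- ===== LEMMAS AND PROOFS =====

-- one keyword list folded into one set (A's innermost loop, on the value at one key)
def pvStep (p : String → Bool) (kws : List String) (s : PySem.Set String) : PySem.Set String :=
  kws.foldl (fun s kw => if p kw then PySem.Set.add s kw else s) s

lemma modify_D7_1 (s1 s2 s3 s4 s5 s6 s7 : PySem.Set String) (f : PySem.Set String → PySem.Set String) :
    (D7 s1 s2 s3 s4 s5 s6 s7).modify "brands" [] f = D7 (f s1) s2 s3 s4 s5 s6 s7 := rfl
lemma modify_D7_2 (s1 s2 s3 s4 s5 s6 s7 : PySem.Set String) (f : PySem.Set String → PySem.Set String) :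
    (D7 s1 s2 s3 s4 s5 s6 s7).modify "materials" [] f = D7 s1 (f s2) s3 s4 s5 s6 s7 := rfl
lemma modify_D7_3 (s1 s2 s3 s4 s5 s6 s7 : PySem.Set String) (f : PySem.Set String → PySem.Set String) :
    (D7 s1 s2 s3 s4 s5 s6 s7).modify "styles" [] f = D7 s1 s2 (f s3) s4 s5 s6 s7 := rfl
lemma modify_D7_4 (s1 s2 s3 s4 s5 s6 s7 : PySem.Set String) (f : PySem.Set String → PySem.Set String) :
    (D7 s1 s2 s3 s4 s5 s6 s7).modify "colors" [] f = D7 s1 s2 s3 (f s4) s5 s6 s7 := rfl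
lemma modify_D7_5 (s1 s2 s3 s4 s5 s6 s7 : PySem.Set String) (f : PySem.Set String → PySem.Set String) :
    (D7 s1 s2 s3 s4 s5 s6 s7).modify "garments" [] f = D7 s1 s2 s3 s4 (f s5) s6 s7 := rfl
lemma modify_D7_6 (s1 s2 s3 s4 s5 s6 s7 : PySem.Set String) (f : PySem.Set String → PySem.Set String) :
    (D7 s1 s2 s3 s4 s5 s6 s7).modify "accessories" [] f = D7 s1 s2 s3 s4 s5 (f s6) s7 := rfl
lemma modify_D7_7 (s1 s2 s3 s4 s5 s6 s7 : PySem.Set String) (f : PySem.Set String → PySem.Set String) :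
    (D7 s1 s2 s3 s4 s5 s6 s7).modify "patterns" [] f = D7 s1 s2 s3 s4 s5 s6 (f s7) := rfl

lemma foldKw_1 (p : String → Bool) (kws : List String) (s1 s2 s3 s4 s5 s6 s7 : PySem.Set String) :
    kws.foldl (fun fe kw => if p kw then PySem.Dict.modify fe "brands" [] (fun s => PySem.Set.add s kw) else fe)
      (D7 s1 s2 s3 s4 s5 s6 s7) = D7 (pvStep p kws s1) s2 s3 s4 s5 s6 s7 := by
  induction kws generalizing s1 with
  | nil => rfl
  | cons kw rest ih =>
    have hc : ∀ s, pvStep p (kw :: rest) s = pvStep p rest (if p kw then PySem.Set.add s kw else s) := fun _ => rfl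
    simp only [List.foldl_cons, hc]
    by_cases h : p kw = true
    · rw [if_pos h, if_pos h, modify_D7_1]; exact ih _
    · rw [if_neg h, if_neg h]; exact ih _

lemma foldKw_2 (p : String → Bool) (kws : List String) (s1 s2 s3 s4 s5 s6 s7 : PySem.Set String) :
    kws.foldl (fun fe kw => if p kw then PySem.Dict.modify fe "materials" [] (fun s => PySem.Set.add s kw) else fe)
      (D7 s1 s2 s3 s4 s5 s6 s7) = D7 s1 (pvStep p kws s2) s3 s4 s5 s6 s7 := by
  induction kws generalizing s2 with
  | nil => rfl
  | cons kw rest ih =>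
    have hc : ∀ s, pvStep p (kw :: rest) s = pvStep p rest (if p kw then PySem.Set.add s kw else s) := fun _ => rfl
    simp only [List.foldl_cons, hc]
    by_cases h : p kw = true
    · rw [if_pos h, if_pos h, modify_D7_2]; exact ih _
    · rw [if_neg h, if_neg h]; exact ih _

lemma foldKw_3 (p : String → Bool) (kws : List String) (s1 s2 s3 s4 s5 s6 s7 : PySem.Set String) :
    kws.foldl (fun fe kw => if p kw then PySem.Dict.modify fe "styles" [] (fun s => PySem.Set.add s kw) else fe)
      (D7 s1 s2 s3 s4 s5 s6 s7) = D7 s1 s2 (pvStep p kws s3) s4 s5 s6 s7 := by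
  induction kws generalizing s3 with
  | nil => rfl
  | cons kw rest ih =>
    have hc : ∀ s, pvStep p (kw :: rest) s = pvStep p rest (if p kw then PySem.Set.add s kw else s) := fun _ => rfl
    simp only [List.foldl_cons, hc]
    by_cases h : p kw = true
    · rw [if_pos h, if_pos h, modify_D7_3]; exact ih _
    · rw [if_neg h, if_neg h]; exact ih _

lemma foldKw_4 (p : String → Bool) (kws : List String) (s1 s2 s3 s4 s5 s6 s7 : PySem.Set String) :
    kws.foldl (fun fe kw => if p kw then PySem.Dict.modify fe "colors" [] (fun s => PySem.Set.add s kw) else fe)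
      (D7 s1 s2 s3 s4 s5 s6 s7) = D7 s1 s2 s3 (pvStep p kws s4) s5 s6 s7 := by
  induction kws generalizing s4 with
  | nil => rfl
  | cons kw rest ih =>
    have hc : ∀ s, pvStep p (kw :: rest) s = pvStep p rest (if p kw then PySem.Set.add s kw else s) := fun _ => rfl
    simp only [List.foldl_cons, hc]
    by_cases h : p kw = true
    · rw [if_pos h, if_pos h, modify_D7_4]; exact ih _
    · rw [if_neg h, if_neg h]; exact ih _

lemma foldKw_5 (p : String → Bool) (kws : List String) (s1 s2 s3 s4 s5 s6 s7 : PySem.Set String) :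
    kws.foldl (fun fe kw => if p kw then PySem.Dict.modify fe "garments" [] (fun s => PySem.Set.add s kw) else fe)
      (D7 s1 s2 s3 s4 s5 s6 s7) = D7 s1 s2 s3 s4 (pvStep p kws s5) s6 s7 := by
  induction kws generalizing s5 with
  | nil => rfl
  | cons kw rest ih =>
    have hc : ∀ s, pvStep p (kw :: rest) s = pvStep p rest (if p kw then PySem.Set.add s kw else s) := fun _ => rfl
    simp only [List.foldl_cons, hc]
    by_cases h : p kw = true
    · rw [if_pos h, if_pos h, modify_D7_5]; exact ih _
    · rw [if_neg h, if_neg h]; exact ih _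

lemma foldKw_6 (p : String → Bool) (kws : List String) (s1 s2 s3 s4 s5 s6 s7 : PySem.Set String) :
    kws.foldl (fun fe kw => if p kw then PySem.Dict.modify fe "accessories" [] (fun s => PySem.Set.add s kw) else fe)
      (D7 s1 s2 s3 s4 s5 s6 s7) = D7 s1 s2 s3 s4 s5 (pvStep p kws s6) s7 := by
  induction kws generalizing s6 with
  | nil => rfl
  | cons kw rest ih =>
    have hc : ∀ s, pvStep p (kw :: rest) s = pvStep p rest (if p kw then PySem.Set.add s kw else s) := fun _ => rfl
    simp only [List.foldl_cons, hc]
    by_cases h : p kw = true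
    · rw [if_pos h, if_pos h, modify_D7_6]; exact ih _
    · rw [if_neg h, if_neg h]; exact ih _

lemma foldKw_7 (p : String → Bool) (kws : List String) (s1 s2 s3 s4 s5 s6 s7 : PySem.Set String) :
    kws.foldl (fun fe kw => if p kw then PySem.Dict.modify fe "patterns" [] (fun s => PySem.Set.add s kw) else fe)
      (D7 s1 s2 s3 s4 s5 s6 s7) = D7 s1 s2 s3 s4 s5 s6 (pvStep p kws s7) := by
  induction kws generalizing s7 with
  | nil => rfl
  | cons kw rest ih =>
    have hc : ∀ s, pvStep p (kw :: rest) s = pvStep p rest (if p kw then PySem.Set.add s kw else s) := fun _ => rfl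
    simp only [List.foldl_cons, hc]
    by_cases h : p kw = true
    · rw [if_pos h, if_pos h, modify_D7_7]; exact ih _
    · rw [if_neg h, if_neg h]; exact ih _

-- the table fold acts componentwise (keyword lists generalized so only the table unfolds)
lemma table_D7 (p : String → Bool) (l1 l2 l3 l4 l5 l6 l7 : List String) (s1 s2 s3 s4 s5 s6 s7 : PySem.Set String) :
    ([("brands", l1), ("materials", l2), ("styles", l3), ("colors", l4), ("garments", l5),
      ("accessories", l6), ("patterns", l7)] : List (String × List String)).foldl (fun fe ck =>
        ck.2.foldl (fun fe kw =>
          if p kw then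
            PySem.Dict.modify fe ck.1 [] (fun s => PySem.Set.add s kw)
          else fe) fe)
      (D7 s1 s2 s3 s4 s5 s6 s7) =
    D7 (pvStep p l1 s1) (pvStep p l2 s2) (pvStep p l3 s3) (pvStep p l4 s4)
       (pvStep p l5 s5) (pvStep p l6 s6) (pvStep p l7 s7) := by
  simp only [List.foldl_cons, List.foldl_nil]
  rw [foldKw_1, foldKw_2, foldKw_3, foldKw_4, foldKw_5, foldKw_6, foldKw_7]

-- one item of A's outer loop, acting componentwise on the seven-key state
lemma item_D7 (item : List (String × String)) (s1 s2 s3 s4 s5 s6 s7 : PySem.Set String) :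
    pvFashionKeywords.foldl (fun fe ck =>
        ck.2.foldl (fun fe kw =>
          if PySem.Str.isIn kw (pvTextOf item) then
            PySem.Dict.modify fe ck.1 [] (fun s => PySem.Set.add s kw)
          else fe) fe)
      (D7 s1 s2 s3 s4 s5 s6 s7) =
    D7 (pvStep (fun kw => PySem.Str.isIn kw (pvTextOf item)) ["gucci", "prada", "chanel", "dior", "versace", "nike", "adidas", "zara"] s1)
       (pvStep (fun kw => PySem.Str.isIn kw (pvTextOf item)) ["silk", "cotton", "wool", "linen", "leather", "denim", "velvet"] s2)
       (pvStep (fun kw => PySem.Str.isIn kw (pvTextOf item)) ["minimalist", "vintage", "bohemian", "streetwear", "classic", "modern"] s3)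
       (pvStep (fun kw => PySem.Str.isIn kw (pvTextOf item)) ["black", "white", "red", "blue", "green", "pink", "navy"] s4)
       (pvStep (fun kw => PySem.Str.isIn kw (pvTextOf item)) ["dress", "shirt", "pants", "jacket", "skirt", "sweater"] s5)
       (pvStep (fun kw => PySem.Str.isIn kw (pvTextOf item)) ["bag", "shoes", "jewelry", "watch", "sunglasses", "hat"] s6)
       (pvStep (fun kw => PySem.Str.isIn kw (pvTextOf item)) ["floral", "striped", "printed", "solid", "checkered"] s7) := by
  rw [show pvFashionKeywords = [("brands", ["gucci", "prada", "chanel", "dior", "versace", "nike", "adidas", "zara"]),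
    ("materials", ["silk", "cotton", "wool", "linen", "leather", "denim", "velvet"]),
    ("styles", ["minimalist", "vintage", "bohemian", "streetwear", "classic", "modern"]),
    ("colors", ["black", "white", "red", "blue", "green", "pink", "navy"]),
    ("garments", ["dress", "shirt", "pants", "jacket", "skirt", "sweater"]),
    ("accessories", ["bag", "shoes", "jewelry", "watch", "sunglasses", "hat"]),
    ("patterns", ["floral", "striped", "printed", "solid", "checkered"])] from rfl]
  exact table_D7 _ _ _ _ _ _ _ _ _ _ _ _ _ _ _


lemma outer_D7 (td : List (List (String × String))) (s1 s2 s3 s4 s5 s6 s7 : PySem.Set String) :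
    td.foldl (fun fe item =>
        pvFashionKeywords.foldl (fun fe ck =>
          ck.2.foldl (fun fe kw =>
            if PySem.Str.isIn kw (pvTextOf item) then
              PySem.Dict.modify fe ck.1 [] (fun s => PySem.Set.add s kw)
            else fe) fe) fe)
      (D7 s1 s2 s3 s4 s5 s6 s7) =
    D7 (td.foldl (fun s item => pvStep (fun kw => PySem.Str.isIn kw (pvTextOf item)) ["gucci", "prada", "chanel", "dior", "versace", "nike", "adidas", "zara"] s) s1)
       (td.foldl (fun s item => pvStep (fun kw => PySem.Str.isIn kw (pvTextOf item)) ["silk", "cotton", "wool", "linen", "leather", "denim", "velvet"] s) s2)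
       (td.foldl (fun s item => pvStep (fun kw => PySem.Str.isIn kw (pvTextOf item)) ["minimalist", "vintage", "bohemian", "streetwear", "classic", "modern"] s) s3)
       (td.foldl (fun s item => pvStep (fun kw => PySem.Str.isIn kw (pvTextOf item)) ["black", "white", "red", "blue", "green", "pink", "navy"] s) s4)
       (td.foldl (fun s item => pvStep (fun kw => PySem.Str.isIn kw (pvTextOf item)) ["dress", "shirt", "pants", "jacket", "skirt", "sweater"] s) s5)
       (td.foldl (fun s item => pvStep (fun kw => PySem.Str.isIn kw (pvTextOf item)) ["bag", "shoes", "jewelry", "watch", "sunglasses", "hat"] s) s6)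
       (td.foldl (fun s item => pvStep (fun kw => PySem.Str.isIn kw (pvTextOf item)) ["floral", "striped", "printed", "solid", "checkered"] s) s7) := by
  induction td generalizing s1 s2 s3 s4 s5 s6 s7 with
  | nil => rfl
  | cons item rest ih =>
    simp only [List.foldl_cons]
    rw [item_D7]
    exact ih _ _ _ _ _ _ _

lemma mem_pvStep (p : String → Bool) (kws : List String) (s : PySem.Set String) (y : String) :
    y ∈ pvStep p kws s ↔ y ∈ s ∨ (y ∈ kws ∧ p y = true) := by
  induction kws generalizing s with
  | nil => simp [pvStep]
  | cons kw rest ih =>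
    have hc : pvStep p (kw :: rest) s = pvStep p rest (if p kw then PySem.Set.add s kw else s) := rfl
    rw [hc]
    by_cases h : p kw = true
    · rw [if_pos h, ih, PySem.Set.mem_add]
      constructor
      · rintro ((hy | rfl) | ⟨hy, hp⟩)
        · exact Or.inl hy
        · exact Or.inr ⟨by simp, h⟩
        · exact Or.inr ⟨List.mem_cons_of_mem _ hy, hp⟩
      · rintro (hy | ⟨hy, hp⟩)
        · exact Or.inl (Or.inl hy)
        · rcases List.mem_cons.mp hy with rfl | hy
          · exact Or.inl (Or.inr rfl)
          · exact Or.inr ⟨hy, hp⟩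
    · rw [if_neg h, ih]
      constructor
      · rintro (hy | ⟨hy, hp⟩)
        · exact Or.inl hy
        · exact Or.inr ⟨List.mem_cons_of_mem _ hy, hp⟩
      · rintro (hy | ⟨hy, hp⟩)
        · exact Or.inl hy
        · rcases List.mem_cons.mp hy with rfl | hy
          · exact absurd hp h
          · exact Or.inr ⟨hy, hp⟩

lemma nodup_pvStep (p : String → Bool) (kws : List String) (s : PySem.Set String)
    (hs : s.Nodup) : (pvStep p kws s).Nodup := by
  induction kws generalizing s with
  | nil => exact hs
  | cons kw rest ih =>
    have hc : pvStep p (kw :: rest) s = pvStep p rest (if p kw then PySem.Set.add s kw else s) := rfl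
    rw [hc]
    by_cases h : p kw = true
    · rw [if_pos h]; exact ih _ (PySem.Set.nodup_add _ _ hs)
    · rw [if_neg h]; exact ih _ hs

lemma mem_sfold (td : List (List (String × String))) (kws : List String) (s : PySem.Set String) (y : String) :
    y ∈ td.foldl (fun s item => pvStep (fun kw => PySem.Str.isIn kw (pvTextOf item)) kws s) s ↔
      y ∈ s ∨ (y ∈ kws ∧ ∃ item ∈ td, PySem.Str.isIn y (pvTextOf item) = true) := by
  induction td generalizing s with
  | nil => simp
  | cons item rest ih =>
    simp only [List.foldl_cons, ih, mem_pvStep, List.mem_cons]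
    constructor
    · rintro ((hy | ⟨hk, hp⟩) | ⟨hk, it, hit, hp⟩)
      · tauto
      · exact Or.inr ⟨hk, item, Or.inl rfl, hp⟩
      · exact Or.inr ⟨hk, it, Or.inr hit, hp⟩
    · rintro (hy | ⟨hk, it, (rfl | hit), hp⟩)
      · tauto
      · exact Or.inl (Or.inr ⟨hk, hp⟩)
      · exact Or.inr ⟨hk, it, hit, hp⟩

lemma nodup_sfold (td : List (List (String × String))) (kws : List String) (s : PySem.Set String)
    (hs : s.Nodup) :
    (td.foldl (fun s item => pvStep (fun kw => PySem.Str.isIn kw (pvTextOf item)) kws s) s).Nodup := by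
  induction td generalizing s with
  | nil => exact hs
  | cons item rest ih => exact ih _ (nodup_pvStep _ _ _ hs)

-- ===== the corpus-join bridge: 'kw in corpus' ↔ some item's text contains kw =====

-- a space-free keyword is a prefix of xs ++ ' ' :: ys iff it is a prefix of xs
lemma prefix_append_cons (c : Char) (xs ys : List Char) :
    ∀ kw : List Char, c ∉ kw → (kw <+: (xs ++ c :: ys) ↔ kw <+: xs) := by
  induction xs with
  | nil =>
    intro kw hc
    constructor
    · intro h
      match kw, h, hc with
      | [], _, _ => exact List.nil_prefix
      | k :: kw', h, hc =>
        obtain ⟨hk, _⟩ := List.cons_prefix_cons.mp h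
        exact absurd (hk ▸ List.mem_cons_self) hc
    · intro h
      rw [List.prefix_nil.mp h]
      exact List.nil_prefix
  | cons x xs' ih =>
    intro kw hc
    cases kw with
    | nil => simp
    | cons k kw' =>
      simp only [List.cons_append, List.cons_prefix_cons]
      exact and_congr_right fun _ => ih kw' (fun h => hc (List.mem_cons_of_mem _ h))

-- a space-free keyword is an infix of xs ++ ' ' :: ys iff it is an infix of xs or of ys
lemma infix_append_cons (c : Char) (ys : List Char) :
    ∀ xs kw : List Char, c ∉ kw → (kw <:+: (xs ++ c :: ys) ↔ kw <:+: xs ∨ kw <:+: ys) := by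
  intro xs
  induction xs with
  | nil =>
    intro kw hc
    have hp := prefix_append_cons c [] ys kw hc
    simp only [List.nil_append] at hp
    rw [List.nil_append, List.infix_cons_iff, hp]
    constructor
    · rintro (h | h)
      · exact Or.inl (List.infix_nil.mpr (List.prefix_nil.mp h))
      · exact Or.inr h
    · rintro (h | h)
      · exact Or.inl (List.prefix_nil.mpr (List.infix_nil.mp h))
      · exact Or.inr h
  | cons x xs' ih =>
    intro kw hc
    rw [List.cons_append, List.infix_cons_iff, ih kw hc,
        show x :: (xs' ++ c :: ys) = (x :: xs') ++ c :: ys from rfl,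
        prefix_append_cons c (x :: xs') ys kw hc, List.infix_cons_iff]
    tauto

-- a nonempty space-free keyword occurs in ' '.join(parts) iff it occurs in some part
lemma isIn_join_space (kw : List Char) (hne : kw ≠ []) (hc : ' ' ∉ kw) :
    ∀ parts : List (List Char),
      PySem.Chars.isIn kw (PySem.Chars.join [' '] parts) = parts.any (fun p => PySem.Chars.isIn kw p) := by
  intro parts
  induction parts with
  | nil =>
    rw [PySem.Chars.join_nil, List.any_nil]
    rw [PySem.Chars.isIn_eq_false_iff]
    intro h
    exact hne (List.infix_nil.mp h)
  | cons p rest ih =>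
    cases rest with
    | nil =>
      rw [PySem.Chars.join_singleton, List.any_cons, List.any_nil, Bool.or_false]
    | cons q rest' =>
      rw [PySem.Chars.join_cons_cons, List.any_cons, Bool.eq_iff_iff, Bool.or_eq_true, ← ih]
      simp only [PySem.Chars.isIn_iff_infix]
      rw [show p ++ [' '] ++ PySem.Chars.join [' '] (q :: rest') = p ++ ' ' :: PySem.Chars.join [' '] (q :: rest') by
            rw [List.append_assoc]; rfl]
      exact infix_append_cons ' ' _ p kw hc

-- the same statement lifted to strings and the list of items
lemma any_isIn_eq_isIn_corpus (td : List (List (String × String))) (kw : String)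
    (hne : kw.toList ≠ []) (hc : ' ' ∉ kw.toList) :
    td.any (fun item => PySem.Str.isIn kw (pvTextOf item)) =
      PySem.Str.isIn kw (PySem.Str.join " " (td.map pvTextOf)) := by
  rw [PySem.Str.isIn_eq, PySem.Str.toList_join]
  rw [show (" " : String).toList = [' '] from rfl]
  rw [List.map_map, isIn_join_space kw.toList hne hc]
  rw [List.any_map]
  simp only [Function.comp_def, PySem.Str.isIn_eq]

-- per category: sorted of A's accumulated set = sorted of the keywords found in the corpus
lemma cat_eq (td : List (List (String × String))) (kws : List String) (hk : kws.Nodup)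
    (hgood : ∀ kw ∈ kws, kw.toList ≠ [] ∧ ' ' ∉ kw.toList) :
    PySem.List.sorted (td.foldl (fun s item => pvStep (fun kw => PySem.Str.isIn kw (pvTextOf item)) kws s) PySem.Set.empty) (fun x => x) false =
    PySem.List.sorted (kws.filter (fun kw => PySem.Str.isIn kw (PySem.Str.join " " (td.map pvTextOf)))) (fun x => x) false := by
  have hfilter : kws.filter (fun kw => PySem.Str.isIn kw (PySem.Str.join " " (td.map pvTextOf))) =
      kws.filter (fun kw => td.any (fun item => PySem.Str.isIn kw (pvTextOf item))) := by
    apply List.filter_congr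
    intro kw hkw
    rw [any_isIn_eq_isIn_corpus td kw (hgood kw hkw).1 (hgood kw hkw).2]
  rw [hfilter]
  apply PySem.List.sorted_eq_sorted_of_perm _ _ _ (fun a b h => h)
  rw [List.perm_ext_iff_of_nodup (nodup_sfold td kws PySem.Set.empty (show (PySem.Set.empty : PySem.Set String).Nodup from List.nodup_nil)) (hk.filter _)]
  intro a
  rw [mem_sfold, List.mem_filter, List.any_eq_true]
  simp only [PySem.Set.empty, List.not_mem_nil, false_or]

-- ===== VERDICT (by name: the statement is the Claim_ definition above) =====
theorem extract_fashion_entities_from_data_py_spec : Claim_equal_extract_fashion_entities_from_data_py := by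
  intro td _
  show extract_fashion_entities_from_data_py td = extract_fashion_entities_from_data_py_alt td
  simp only [extract_fashion_entities_from_data_py, extract_fashion_entities_from_data_py_alt]
  rw [outer_D7]
  simp only [D7, List.map_cons, List.map_nil]
  simp only [List.cons.injEq, Prod.mk.injEq, and_true, true_and]
  refine ⟨?_, ?_, ?_, ?_, ?_, ?_, ?_⟩ <;> exact cat_eq td _ (by decide) (by decide)
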